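-- pv_equiv track=rewrite | github.com/AmauryLiet/CodeJam | 2018/qualif/robot.py | get_impact
-- ===== SOURCE A (Python) =====
-- def get_impact(s: str):
--     strength = 1
--     impact = 0
--     for c in s:
--         if c == 'S':
--             impact += strength
--         else:
--             strength *= 2
--     return impact
-- ===== SOURCE B (Python) =====
-- import re
--
-- def get_impact(s: str):
--     total = 0
--     weight = 1
--     for seg in re.split(r'[^S]', s):
--         total += len(seg) * weight
--         weight *= 2
--     return total
-- ===== Notes on version B (the rewrite author's own statement) =====
-- stated objective: alternative
-- what changed: B splits the string with re.split into maximal runs of the shoot character (split on every other character) and sums segment lengths under a per-segment doubling weight, instead of A's per-character branch on a running strength/impact pair.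
import Mathlib
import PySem

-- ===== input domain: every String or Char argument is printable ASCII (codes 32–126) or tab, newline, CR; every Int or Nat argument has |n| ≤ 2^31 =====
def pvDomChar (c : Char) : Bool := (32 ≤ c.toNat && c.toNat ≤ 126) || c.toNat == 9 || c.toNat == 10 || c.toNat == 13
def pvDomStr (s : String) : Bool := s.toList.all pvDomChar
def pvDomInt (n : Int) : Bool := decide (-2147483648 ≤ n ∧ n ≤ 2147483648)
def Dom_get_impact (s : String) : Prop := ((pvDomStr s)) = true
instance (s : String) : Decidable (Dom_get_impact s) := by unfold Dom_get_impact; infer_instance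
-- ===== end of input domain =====

-- B splits the string with re.split into maximal runs of 'S' (split on every other
-- character) and sums segment lengths under a per-segment doubling weight (objective: alternative).

-- ===== PORT A =====
def get_impact (s : String) : Int :=
  (s.toList.foldl
    (fun (st : Int × Int) c =>
      if c = 'S' then (st.1, st.2 + st.1) else (st.1 * 2, st.2))
    (1, 0)).2

-- ===== PORT B =====
-- re.split(r'[^S]', s): split the character list at every non-'S' character
def splitNonS : List Char → List (List Char)
  | [] => [[]]
  | c :: rest =>
    match splitNonS rest with
    | [] => []  -- unreachable: splitNonS never returns []
    | seg :: segs => if c = 'S' then (c :: seg) :: segs else [] :: seg :: segs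

def get_impact_alt (s : String) : Int :=
  ((splitNonS s.toList).foldl
    (fun (acc : Int × Int) seg => (acc.1 + (seg.length : Int) * acc.2, acc.2 * 2))
    (0, 1)).1

-- ===== PRECONDITION & SPEC =====
def Spec_get_impact (s : String) (out : Int) : Prop := out = get_impact_alt s
instance (s : String) (out : Int) : Decidable (Spec_get_impact s out) := by unfold Spec_get_impact; infer_instance

-- ===== CLAIM (what is proved, stated in full; the proofs are below) =====
def Claim_equal_get_impact : Prop := ∀ (s : String), Dom_get_impact s → Spec_get_impact s (get_impact s)

-- ===== LEMMAS AND PROOFS =====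

-- recursive form of B's weighted sum
def wsum : List (List Char) → Int
  | [] => 0
  | seg :: segs => (seg.length : Int) + 2 * wsum segs

theorem foldB_wsum (segs : List (List Char)) (t w : Int) :
    (segs.foldl
      (fun (acc : Int × Int) seg => (acc.1 + (seg.length : Int) * acc.2, acc.2 * 2))
      (t, w)).1 = t + w * wsum segs := by
  induction segs generalizing t w with
  | nil => simp [wsum]
  | cons seg segs ih => simp [wsum, ih]; ring

theorem splitNonS_ne_nil (cs : List Char) : splitNonS cs ≠ [] := by
  induction cs with
  | nil => simp [splitNonS]
  | cons c rest ih =>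
    rcases h : splitNonS rest with _ | ⟨a, b⟩
    · exact absurd h ih
    · simp only [splitNonS, h]
      split <;> simp

theorem foldA_wsum (cs : List Char) (st imp : Int) :
    (cs.foldl
      (fun (st : Int × Int) c =>
        if c = 'S' then (st.1, st.2 + st.1) else (st.1 * 2, st.2))
      (st, imp)).2 = imp + st * wsum (splitNonS cs) := by
  induction cs generalizing st imp with
  | nil => simp [splitNonS, wsum]
  | cons c rest ih =>
    obtain ⟨seg, segs, hrec⟩ : ∃ seg segs, splitNonS rest = seg :: segs := by
      cases h : splitNonS rest with
      | nil => exact absurd h (splitNonS_ne_nil rest)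
      | cons a b => exact ⟨a, b, rfl⟩
    simp only [List.foldl_cons, splitNonS, hrec]
    by_cases h : c = 'S' <;> simp [h, ih, hrec, wsum] <;> ring

-- ===== VERDICT (by name: the statement is the Claim_ definition above) =====
theorem get_impact_spec : Claim_equal_get_impact := by
  intro s _
  unfold Spec_get_impact get_impact get_impact_alt
  rw [foldA_wsum, foldB_wsum]
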